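-- pv_equiv track=rewrite | github.com/ritik-gupta001/Medisure.AI | intelligent_analyzer.py | _generate_monitoring_plan
-- ===== SOURCE A (Python) =====
-- from typing import Dict, Any, List, Optional, Tuple
--
-- def _generate_monitoring_plan(conditions: List, lab_values: Dict) -> List[str]:
--     """Generate specific monitoring plan"""
--     monitoring_plan = []
--
--     for condition in conditions:
--         if 'Diabetes' in condition['name']:
--             monitoring_plan.extend([
--                 "Check fasting glucose 2-3 times per week initially",
--                 "Monitor HbA1c every 3 months until stable, then every 6 months",
--                 "Annual eye exam for diabetic retinopathy screening"
--             ])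
--         elif 'Cardiovascular' in condition['name']:
--             monitoring_plan.extend([
--                 "Check blood pressure weekly at home if elevated",
--                 "Repeat lipid panel in 6-8 weeks after starting interventions",
--                 "Annual cardiovascular risk assessment"
--             ])
--         elif 'Kidney' in condition['name']:
--             monitoring_plan.extend([
--                 "Monitor kidney function (creatinine, BUN) every 3-6 months",
--                 "Check urine for protein annually"
--             ])
--
--     monitoring_plan.extend([
--         "Schedule comprehensive metabolic panel annually for general health monitoring",
--         "Track weight, blood pressure, and any symptoms between visits"
--     ])
--
--     return monitoring_plan
-- ===== SOURCE B (Python) =====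
-- _MONITORING_TABLE = [
--     ("Diabetes", [
--         "Check fasting glucose 2-3 times per week initially",
--         "Monitor HbA1c every 3 months until stable, then every 6 months",
--         "Annual eye exam for diabetic retinopathy screening",
--     ]),
--     ("Cardiovascular", [
--         "Check blood pressure weekly at home if elevated",
--         "Repeat lipid panel in 6-8 weeks after starting interventions",
--         "Annual cardiovascular risk assessment",
--     ]),
--     ("Kidney", [
--         "Monitor kidney function (creatinine, BUN) every 3-6 months",
--         "Check urine for protein annually",
--     ]),
-- ]
--
-- _TRAILER = [
--     "Schedule comprehensive metabolic panel annually for general health monitoring",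
--     "Track weight, blood pressure, and any symptoms between visits",
-- ]
--
--
-- def _block(name):
--     """Monitoring strings for the first matching keyword, [] if none."""
--     return next((msgs for kw, msgs in _MONITORING_TABLE if kw in name), [])
--
--
-- def _generate_monitoring_plan(conditions, lab_values):
--     # Structural recursion, building the plan back-to-front: the base case is
--     # the constant trailer, each step prepends the block for the first condition.
--     if not conditions:
--         return list(_TRAILER)
--     return _block(conditions[0]['name']) + _generate_monitoring_plan(conditions[1:], lab_values)
-- ===== Notes on version B (the rewrite author's own statement) =====
-- stated objective: alternative
-- what changed: Replaces the imperative accumulator loop over an if/elif ladder with structural recursion that builds the plan back-to-front (trailer as the recursion base) and a data-driven first-match table lookup per condition.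
import Mathlib
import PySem

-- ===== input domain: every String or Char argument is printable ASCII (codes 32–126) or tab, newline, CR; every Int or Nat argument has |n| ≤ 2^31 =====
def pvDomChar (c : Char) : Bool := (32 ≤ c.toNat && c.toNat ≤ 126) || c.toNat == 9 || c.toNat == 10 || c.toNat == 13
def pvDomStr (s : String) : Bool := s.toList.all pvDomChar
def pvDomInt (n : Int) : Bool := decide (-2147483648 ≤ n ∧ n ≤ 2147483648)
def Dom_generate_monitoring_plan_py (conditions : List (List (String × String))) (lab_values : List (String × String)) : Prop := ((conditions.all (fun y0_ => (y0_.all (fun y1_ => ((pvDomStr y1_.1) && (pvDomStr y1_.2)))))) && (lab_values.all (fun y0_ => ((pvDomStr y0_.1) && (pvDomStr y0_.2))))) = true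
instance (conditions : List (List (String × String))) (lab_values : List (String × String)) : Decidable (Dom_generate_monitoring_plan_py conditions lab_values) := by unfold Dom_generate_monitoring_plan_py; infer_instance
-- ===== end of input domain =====

-- B replaces A's accumulator loop over an if/elif ladder with structural recursion
-- (trailer as the base case, plan built back-to-front) and a table-driven first-match
-- block per condition; objective: alternative decomposition, same cost.

-- ===== PORT A =====
def generate_monitoring_plan_py (conditions : List (List (String × String))) (lab_values : List (String × String)) : List String :=
  let monitoring_plan : List String := []
  let monitoring_plan := conditions.foldl (fun monitoring_plan condition =>
    let name := PySem.Dict.getD ⟨condition⟩ "name" ""   -- condition['name']; Pre_ guarantees the key exists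
    if PySem.Str.isIn "Diabetes" name then
      monitoring_plan ++ [
        "Check fasting glucose 2-3 times per week initially",
        "Monitor HbA1c every 3 months until stable, then every 6 months",
        "Annual eye exam for diabetic retinopathy screening"]
    else if PySem.Str.isIn "Cardiovascular" name then
      monitoring_plan ++ [
        "Check blood pressure weekly at home if elevated",
        "Repeat lipid panel in 6-8 weeks after starting interventions",
        "Annual cardiovascular risk assessment"]
    else if PySem.Str.isIn "Kidney" name then
      monitoring_plan ++ [
        "Monitor kidney function (creatinine, BUN) every 3-6 months",
        "Check urine for protein annually"]
    else monitoring_plan) monitoring_plan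
  monitoring_plan ++ [
    "Schedule comprehensive metabolic panel annually for general health monitoring",
    "Track weight, blood pressure, and any symptoms between visits"]

-- ===== PORT B =====
def pvMonitoringTable : List (String × List String) :=
  [("Diabetes", [
      "Check fasting glucose 2-3 times per week initially",
      "Monitor HbA1c every 3 months until stable, then every 6 months",
      "Annual eye exam for diabetic retinopathy screening"]),
   ("Cardiovascular", [
      "Check blood pressure weekly at home if elevated",
      "Repeat lipid panel in 6-8 weeks after starting interventions",
      "Annual cardiovascular risk assessment"]),
   ("Kidney", [
      "Monitor kidney function (creatinine, BUN) every 3-6 months",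
      "Check urine for protein annually"])]

def pvTrailer : List String :=
  ["Schedule comprehensive metabolic panel annually for general health monitoring",
   "Track weight, blood pressure, and any symptoms between visits"]

-- next((msgs for kw, msgs in _MONITORING_TABLE if kw in name), [])
def pvBlock (name : String) : List String :=
  match pvMonitoringTable.find? (fun kv => PySem.Str.isIn kv.1 name) with
  | some kv => kv.2
  | none => []

def generate_monitoring_plan_py_alt (conditions : List (List (String × String))) (lab_values : List (String × String)) : List String :=
  match conditions with
  | [] => pvTrailer
  | c :: rest =>
      pvBlock (PySem.Dict.getD ⟨c⟩ "name" "") ++ generate_monitoring_plan_py_alt rest lab_values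

-- ===== PRECONDITION & SPEC =====
-- Pre_ excludes conditions missing the 'name' key, on which A (and B) raise KeyError.
def Pre_generate_monitoring_plan_py (conditions : List (List (String × String))) (lab_values : List (String × String)) : Prop :=
  conditions.all (fun c => PySem.Dict.contains (⟨c⟩ : PySem.Dict String String) "name") = true
instance (conditions : List (List (String × String))) (lab_values : List (String × String)) : Decidable (Pre_generate_monitoring_plan_py conditions lab_values) := by unfold Pre_generate_monitoring_plan_py; infer_instance
def pvWitness_generate_monitoring_plan_py : (List (List (String × String))) × (List (String × String)) :=
  ([[("name", "Diabetes Type 2")], [("name", "Hypertension")]], [("glucose", "180")])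

def Spec_generate_monitoring_plan_py (conditions : List (List (String × String))) (lab_values : List (String × String)) (out : List String) : Prop := out = generate_monitoring_plan_py_alt conditions lab_values
instance (conditions : List (List (String × String))) (lab_values : List (String × String)) (out : List String) : Decidable (Spec_generate_monitoring_plan_py conditions lab_values out) := by unfold Spec_generate_monitoring_plan_py; infer_instance

-- ===== CLAIM =====
def Claim_equal_generate_monitoring_plan_py : Prop := ∀ (conditions : List (List (String × String))) (lab_values : List (String × String)), Dom_generate_monitoring_plan_py conditions lab_values → Pre_generate_monitoring_plan_py conditions lab_values → Spec_generate_monitoring_plan_py conditions lab_values (generate_monitoring_plan_py conditions lab_values)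

-- ===== LEMMAS AND PROOFS =====
-- A's loop step equals 'append the first-match block'.
lemma pv_step_eq (plan : List String) (condition : List (String × String)) :
    (let name := PySem.Dict.getD ⟨condition⟩ "name" ""
     if PySem.Str.isIn "Diabetes" name then
       plan ++ [
        "Check fasting glucose 2-3 times per week initially",
        "Monitor HbA1c every 3 months until stable, then every 6 months",
        "Annual eye exam for diabetic retinopathy screening"]
     else if PySem.Str.isIn "Cardiovascular" name then
       plan ++ [
        "Check blood pressure weekly at home if elevated",
        "Repeat lipid panel in 6-8 weeks after starting interventions",
        "Annual cardiovascular risk assessment"]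
     else if PySem.Str.isIn "Kidney" name then
       plan ++ [
        "Monitor kidney function (creatinine, BUN) every 3-6 months",
        "Check urine for protein annually"]
     else plan) =
    plan ++ pvBlock (PySem.Dict.getD ⟨condition⟩ "name" "") := by
  set name := PySem.Dict.getD ⟨condition⟩ "name" "" with hname
  simp only [pvBlock, pvMonitoringTable, List.find?]
  cases h1 : PySem.Str.isIn "Diabetes" name
  · cases h2 : PySem.Str.isIn "Cardiovascular" name
    · cases h3 : PySem.Str.isIn "Kidney" name <;> simp [h1, h2, h3]
    · simp [h1, h2]
  · simp [h1]

-- A's accumulator loop plus the trailer equals B's back-to-front recursion.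
lemma pv_fold_eq (cs : List (List (String × String))) (lab_values : List (String × String)) :
    ∀ plan : List String,
    (cs.foldl (fun monitoring_plan condition =>
      let name := PySem.Dict.getD ⟨condition⟩ "name" ""
      if PySem.Str.isIn "Diabetes" name then
        monitoring_plan ++ [
          "Check fasting glucose 2-3 times per week initially",
          "Monitor HbA1c every 3 months until stable, then every 6 months",
          "Annual eye exam for diabetic retinopathy screening"]
      else if PySem.Str.isIn "Cardiovascular" name then
        monitoring_plan ++ [
          "Check blood pressure weekly at home if elevated",
          "Repeat lipid panel in 6-8 weeks after starting interventions",
          "Annual cardiovascular risk assessment"]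
      else if PySem.Str.isIn "Kidney" name then
        monitoring_plan ++ [
          "Monitor kidney function (creatinine, BUN) every 3-6 months",
          "Check urine for protein annually"]
      else monitoring_plan) plan) ++ pvTrailer
      = plan ++ generate_monitoring_plan_py_alt cs lab_values := by
  induction cs with
  | nil => intro plan; simp [generate_monitoring_plan_py_alt]
  | cons c rest ih =>
      intro plan
      simp only [List.foldl_cons, generate_monitoring_plan_py_alt]
      rw [pv_step_eq plan c] at *
      rw [ih (plan ++ pvBlock (PySem.Dict.getD ⟨c⟩ "name" ""))]
      simp [List.append_assoc]

-- ===== VERDICT =====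
theorem generate_monitoring_plan_py_spec : Claim_equal_generate_monitoring_plan_py := by
  intro conditions lab_values _ _
  unfold Spec_generate_monitoring_plan_py generate_monitoring_plan_py
  simpa [pvTrailer] using pv_fold_eq conditions lab_values []
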